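-- pv_equiv track=rewrite | github.com/brython-dev/brython | www/src/Lib/binascii.py | b2a_uu
-- ===== SOURCE A (Python) =====
-- class Error(ValueError):
--     def __init__(self, msg=''):
--         self._msg = msg
--
--     def __str__(self):
--         return " binascii.Error: "+self._msg
--
-- def b2a_uu(s):
--     length = len(s)
--     if length > 45:
--         raise Error('At most 45 bytes at once')
--
--     def triples_gen(s):
--         while s:
--             try:
--                 yield ord(s[0]), ord(s[1]), ord(s[2])
--             except IndexError:
--                 s += '\0\0'
--                 yield ord(s[0]), ord(s[1]), ord(s[2])
--                 return
--             s = s[3:]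
--
--     result = [''.join(
--         [chr(0x20 + (( A >> 2                    ) & 0x3F)),
--          chr(0x20 + (((A << 4) | ((B >> 4) & 0xF)) & 0x3F)),
--          chr(0x20 + (((B << 2) | ((C >> 6) & 0x3)) & 0x3F)),
--          chr(0x20 + (( C                         ) & 0x3F))])
--               for A, B, C in triples_gen(s)]
--     return chr(ord(' ') + (length & 0o77)) + ''.join(result) + '\n'
-- ===== SOURCE B (Python) =====
-- class Error(ValueError):
--     def __init__(self, msg=''):
--         self._msg = msg
--
--     def __str__(self):
--         return " binascii.Error: "+self._msg
--
-- def b2a_uu(s):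
--     length = len(s)
--     if length > 45:
--         raise Error('At most 45 bytes at once')
--     t = s + '\0' * ((-length) % 3)
--     out = [chr(0x20 + (length & 0o77))]
--     for i in range(0, len(t), 3):
--         A, B, C = ord(t[i]), ord(t[i + 1]), ord(t[i + 2])
--         out.append(chr(0x20 + ((A >> 2) & 0x3F)))
--         out.append(chr(0x20 + (((A << 4) | ((B >> 4) & 0xF)) & 0x3F)))
--         out.append(chr(0x20 + (((B << 2) | ((C >> 6) & 0x3)) & 0x3F)))
--         out.append(chr(0x20 + (C & 0x3F)))
--     out.append('\n')
--     return ''.join(out)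
-- ===== Notes on version B (the rewrite author's own statement) =====
-- stated objective: simpler
-- what changed: Replaces the lazy generator with IndexError-driven padding and repeated s[3:] slicing by a single up-front zero-pad to a multiple of 3 followed by a direct index loop in steps of 3.
import Mathlib
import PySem

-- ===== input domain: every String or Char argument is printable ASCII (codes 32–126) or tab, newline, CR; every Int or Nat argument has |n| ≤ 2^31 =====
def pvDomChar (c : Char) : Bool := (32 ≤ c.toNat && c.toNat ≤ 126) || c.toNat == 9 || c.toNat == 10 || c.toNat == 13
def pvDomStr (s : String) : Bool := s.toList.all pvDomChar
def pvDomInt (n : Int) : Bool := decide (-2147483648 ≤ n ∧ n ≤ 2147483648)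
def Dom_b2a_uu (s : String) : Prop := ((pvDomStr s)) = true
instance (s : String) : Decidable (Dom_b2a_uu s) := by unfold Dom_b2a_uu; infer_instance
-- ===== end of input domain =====

-- B replaces A's lazy generator (IndexError-driven '\0\0' padding, repeated s[3:] slicing)
-- by one up-front zero-pad to a multiple of 3 and a direct index loop in steps of 3 (simpler).

-- ===== PORT A =====
-- the inner generator triples_gen: the `except IndexError` branches are the 1- and
-- 2-element cases (s += '\0\0', ord((Char.ofNat 0)) = 0), `s = s[3:]` is the recursive call
def pvTriplesGenA : List Char → List (Int × Int × Int)
  | [] => []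
  | [a] => [((a.toNat : Int), (((Char.ofNat 0).toNat : Nat) : Int), (((Char.ofNat 0).toNat : Nat) : Int))]
  | [a, b] => [((a.toNat : Int), (b.toNat : Int), (((Char.ofNat 0).toNat : Nat) : Int))]
  | a :: b :: c :: rest => ((a.toNat : Int), (b.toNat : Int), (c.toNat : Int)) :: pvTriplesGenA rest

-- the four-character ''.join([...]) body of the comprehension
def pvEncA (t : Int × Int × Int) : List Char :=
  let A := t.1; let B := t.2.1; let C := t.2.2
  [Char.ofNat (0x20 + (PySem.Int.band (A >>> 2) 0x3F)).toNat,
   Char.ofNat (0x20 + (PySem.Int.band (PySem.Int.bor (A <<< 4) (PySem.Int.band (B >>> 4) 0xF)) 0x3F)).toNat,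
   Char.ofNat (0x20 + (PySem.Int.band (PySem.Int.bor (B <<< 2) (PySem.Int.band (C >>> 6) 0x3)) 0x3F)).toNat,
   Char.ofNat (0x20 + (PySem.Int.band C 0x3F)).toNat]

-- the `raise Error` for length > 45 is excluded by Pre_b2a_uu
def b2a_uu (s : String) : String :=
  let length : Int := PySem.Str.len s
  let result : List (List Char) := (pvTriplesGenA s.toList).map pvEncA
  String.ofList ([Char.ofNat ((' '.toNat : Int) + PySem.Int.band length 0o77).toNat]
             ++ result.flatten ++ ['\n'])

-- ===== PORT B =====
-- the four out.append(...) statements of B's loop body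
def pvEncB (a b c : Char) : List Char :=
  let A : Int := (a.toNat : Int); let B : Int := (b.toNat : Int); let C : Int := (c.toNat : Int)
  [Char.ofNat (0x20 + (PySem.Int.band (A >>> 2) 0x3F)).toNat,
   Char.ofNat (0x20 + (PySem.Int.band (PySem.Int.bor (A <<< 4) (PySem.Int.band (B >>> 4) 0xF)) 0x3F)).toNat,
   Char.ofNat (0x20 + (PySem.Int.band (PySem.Int.bor (B <<< 2) (PySem.Int.band (C >>> 6) 0x3)) 0x3F)).toNat,
   Char.ofNat (0x20 + (PySem.Int.band C 0x3F)).toNat]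

def b2a_uu_alt (s : String) : String :=
  let length : Int := PySem.Str.len s
  let t : List Char := s.toList ++ List.replicate (PySem.Int.mod (-length) 3).toNat (Char.ofNat 0)
  let out : List Char :=
    (PySem.List.pyRange 0 (t.length : Int) 3).foldl
      (fun acc i =>
        acc ++ pvEncB (PySem.List.pyGetD t i (Char.ofNat 0))
                      (PySem.List.pyGetD t (i + 1) (Char.ofNat 0))
                      (PySem.List.pyGetD t (i + 2) (Char.ofNat 0)))
      [Char.ofNat (0x20 + PySem.Int.band length 0o77).toNat]
  String.ofList (out ++ ['\n'])

-- ===== PRECONDITION & SPEC =====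
-- A raises binascii.Error when len(s) > 45; exactly those inputs are excluded
def Pre_b2a_uu (s : String) : Prop := PySem.Str.len s ≤ 45
instance (s : String) : Decidable (Pre_b2a_uu s) := by unfold Pre_b2a_uu; infer_instance
def pvWitness_b2a_uu : String := "abc"

def Spec_b2a_uu (s : String) (out : String) : Prop := out = b2a_uu_alt s
instance (s : String) (out : String) : Decidable (Spec_b2a_uu s out) := by unfold Spec_b2a_uu; infer_instance

-- ===== CLAIM (what is proved, stated in full; the proofs are below) =====
def Claim_equal_b2a_uu : Prop := ∀ (s : String), Dom_b2a_uu s → Pre_b2a_uu s → Spec_b2a_uu s (b2a_uu s)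

-- ===== LEMMAS AND PROOFS =====

-- proof-side reference: the encoded body as a 3-chunk recursion
def pvChunks : List Char → List Char
  | a :: b :: c :: rest => pvEncB a b c ++ pvChunks rest
  | _ => []

theorem pv_enc_eq (a b c : Char) :
    pvEncA ((a.toNat : Int), (b.toNat : Int), (c.toNat : Int)) = pvEncB a b c := rfl

theorem pvRange3_nil (a b : Int) (h : b ≤ a) : PySem.List.pyRange a b 3 = [] := by
  rw [PySem.List.pyRange_of_pos a b (by norm_num)]
  rw [if_neg (by omega)]
  simp

theorem pvRange3_cons (a b : Int) (h : a < b) :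
    PySem.List.pyRange a b 3 = a :: PySem.List.pyRange (a + 3) b 3 := by
  rw [PySem.List.pyRange_of_pos a b (by norm_num),
      PySem.List.pyRange_of_pos (a + 3) b (by norm_num)]
  by_cases h3 : a + 3 < b
  · simp only [if_pos h, if_pos h3]
    have hN : ((b - a + 3 - 1) / 3).toNat = ((b - (a + 3) + 3 - 1) / 3).toNat + 1 := by omega
    rw [hN, List.range_succ_eq_map]
    simp only [List.map_cons, List.map_map, Nat.cast_zero, mul_zero, add_zero]
    congr 1
    apply List.map_congr_left
    intro k _
    simp only [Function.comp]
    push_cast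
    ring
  · simp only [if_pos h, if_neg h3]
    have hN : ((b - a + 3 - 1) / 3).toNat = 1 := by omega
    rw [hN]
    simp

theorem pv_getD_append (u l : List Char) (k : Nat) (hk : k < l.length) :
    (u ++ l).getD (u.length + k) (Char.ofNat 0) = l[k] := by
  rw [List.getD_eq_getElem?_getD, List.getElem?_append_right (by omega)]
  simp [List.getElem?_eq_getElem hk]

theorem pv_loopB : ∀ (t w u acc : List Char), w = u ++ t → 3 ∣ t.length →
    (PySem.List.pyRange ((u.length : Nat) : Int) ((w.length : Nat) : Int) 3).foldl
      (fun acc i =>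
        acc ++ pvEncB (PySem.List.pyGetD w i (Char.ofNat 0))
                      (PySem.List.pyGetD w (i + 1) (Char.ofNat 0))
                      (PySem.List.pyGetD w (i + 2) (Char.ofNat 0))) acc
    = acc ++ pvChunks t
  | [], w, u, acc, hw, _ => by
    have hlen : w.length = u.length := by subst hw; simp
    rw [hlen, pvRange3_nil _ _ (le_refl _)]
    simp [pvChunks]
  | [a], _, _, _, _, h3 => by simp at h3
  | [a, b], _, _, _, _, h3 => by simp at h3
  | a :: b :: c :: r, w, u, acc, hw, h3 => by
    have hlen : w.length = u.length + (r.length + 3) := by subst hw; simp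
    have hlt : ((u.length : Nat) : Int) < ((w.length : Nat) : Int) := by
      rw [hlen]; push_cast; omega
    rw [pvRange3_cons _ _ hlt, List.foldl_cons]
    have c1 : ((u.length : Nat) : Int) + 1 = (((u.length + 1 : Nat)) : Int) := by push_cast; ring
    have c2 : ((u.length : Nat) : Int) + 2 = (((u.length + 2 : Nat)) : Int) := by push_cast; ring
    have e0 : PySem.List.pyGetD w ((u.length : Nat) : Int) (Char.ofNat 0) = a := by
      rw [PySem.List.pyGetD_natCast, hw]
      have h := pv_getD_append u (a :: b :: c :: r) 0 (by simp)
      rw [Nat.add_zero] at h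
      exact h
    have e1 : PySem.List.pyGetD w (((u.length : Nat) : Int) + 1) (Char.ofNat 0) = b := by
      rw [c1, PySem.List.pyGetD_natCast, hw]
      exact pv_getD_append u (a :: b :: c :: r) 1 (by simp)
    have e2 : PySem.List.pyGetD w (((u.length : Nat) : Int) + 2) (Char.ofNat 0) = c := by
      rw [c2, PySem.List.pyGetD_natCast, hw]
      exact pv_getD_append u (a :: b :: c :: r) 2 (by simp)
    rw [e0, e1, e2]
    have hw' : w = (u ++ [a, b, c]) ++ r := by rw [hw]; simp
    have h3' : 3 ∣ r.length := by simp at h3; omega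
    have hu' : (((u ++ [a, b, c]).length : Nat) : Int) = ((u.length : Nat) : Int) + 3 := by
      simp
    have := pv_loopB r w (u ++ [a, b, c]) (acc ++ pvEncB a b c) hw' h3'
    rw [hu'] at this
    rw [this, show pvChunks (a :: b :: c :: r) = pvEncB a b c ++ pvChunks r from rfl,
       ← List.append_assoc]

-- the range loop of b2a_uu_alt, started at index 0 on the whole padded list
theorem pv_loop_whole (t acc : List Char) (h3 : 3 ∣ t.length) :
    (PySem.List.pyRange 0 ((t.length : Nat) : Int) 3).foldl
      (fun acc i =>
        acc ++ pvEncB (PySem.List.pyGetD t i (Char.ofNat 0))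
                      (PySem.List.pyGetD t (i + 1) (Char.ofNat 0))
                      (PySem.List.pyGetD t (i + 2) (Char.ofNat 0))) acc
    = acc ++ pvChunks t := by
  have := pv_loopB t t [] acc rfl h3
  simpa using this

theorem pv_pad_dvd (n : Nat) : 3 ∣ (n + (PySem.Int.mod (-(n : Int)) 3).toNat) := by
  rw [PySem.Int.mod_eq_emod_of_pos (by norm_num)]
  omega

theorem pv_Aside : ∀ (l : List Char),
    ((pvTriplesGenA l).map pvEncA).flatten
      = pvChunks (l ++ List.replicate ((PySem.Int.mod (-((l.length : Nat) : Int)) 3).toNat) (Char.ofNat 0))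
  | [] => by
    have h : (PySem.Int.mod (-(((List.length ([] : List Char)) : Nat) : Int)) 3).toNat = 0 := by decide
    rw [h]
    simp [pvTriplesGenA, pvChunks]
  | [a] => by
    have h : (PySem.Int.mod (-(((List.length [a]) : Nat) : Int)) 3).toNat = 2 := by
      simp only [List.length_cons, List.length_nil]; decide
    rw [h]
    simp only [pvTriplesGenA, List.map_cons, List.map_nil, List.flatten]
    show pvEncA _ ++ [] = pvChunks (a :: [Char.ofNat 0, Char.ofNat 0])
    rw [List.append_nil]
    show pvEncA _ = pvEncB a (Char.ofNat 0) (Char.ofNat 0) ++ pvChunks []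
    rw [show pvChunks [] = [] from rfl, List.append_nil]
    rfl
  | [a, b] => by
    have h : (PySem.Int.mod (-(((List.length [a, b]) : Nat) : Int)) 3).toNat = 1 := by
      simp only [List.length_cons, List.length_nil]; decide
    rw [h]
    simp only [pvTriplesGenA, List.map_cons, List.map_nil, List.flatten]
    show pvEncA _ ++ [] = pvChunks (a :: b :: [Char.ofNat 0])
    rw [List.append_nil]
    show pvEncA _ = pvEncB a b (Char.ofNat 0) ++ pvChunks []
    rw [show pvChunks [] = [] from rfl, List.append_nil]
    rfl
  | a :: b :: c :: r => by
    have hm : (PySem.Int.mod (-(((List.length (a :: b :: c :: r)) : Nat) : Int)) 3).toNat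
            = (PySem.Int.mod (-(((List.length r) : Nat) : Int)) 3).toNat := by
      rw [PySem.Int.mod_eq_emod_of_pos (by norm_num), PySem.Int.mod_eq_emod_of_pos (by norm_num)]
      simp only [List.length_cons]
      push_cast
      omega
    rw [hm]
    simp only [pvTriplesGenA, List.map_cons, List.flatten_cons]
    rw [pv_Aside r]
    show pvEncA _ ++ _ = pvChunks (a :: b :: c :: (r ++ _))
    rw [show ∀ x y z rest, pvChunks (x :: y :: z :: rest) = pvEncB x y z ++ pvChunks rest
          from fun _ _ _ _ => rfl]
    rw [pv_enc_eq]

-- ===== VERDICT (by name: the statement is the Claim_ definition above) =====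
theorem b2a_uu_spec : Claim_equal_b2a_uu := by
  intro s _ _
  show b2a_uu s = b2a_uu_alt s
  simp only [b2a_uu, b2a_uu_alt, PySem.Str.len_eq]
  apply congrArg String.ofList
  rw [pv_loop_whole _ _ (by rw [List.length_append, List.length_replicate]; exact pv_pad_dvd _)]
  rw [pv_Aside s.toList]
  rw [show ((' '.toNat : Nat) : Int) = 0x20 from by decide]
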